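-- pv_equiv track=rewrite | github.com/joaoPauloDias/camouflage | main.py | are_segments_neighbors
-- ===== SOURCE A (Python) =====
-- def are_segments_neighbors(segment1, segment2):
--     segment1_set = set(segment1)
--     segment2_set = set(segment2)
--
--     for x1, y1 in segment1_set:
--         for dx, dy in [(0, 1), (1, 0), (0, -1), (-1, 0)]:
--             x2, y2 = x1 + dx, y1 + dy
--             if (x2, y2) in segment2_set:
--                 return True
--
--     return False
-- ===== SOURCE B (Python) =====
-- def are_segments_neighbors(segment1, segment2):
--     for x1, y1 in segment1:
--         for x2, y2 in segment2:
--             if abs(x1 - x2) + abs(y1 - y2) == 1: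
--                 return True
--     return False
-- ===== Notes on version B (the rewrite author's own statement) =====
-- stated objective: simpler
-- what changed: Replaced the set construction plus 4-neighbor-offset membership probing with a direct pairwise scan that tests Manhattan distance 1 between points of the two segments.
import Mathlib
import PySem

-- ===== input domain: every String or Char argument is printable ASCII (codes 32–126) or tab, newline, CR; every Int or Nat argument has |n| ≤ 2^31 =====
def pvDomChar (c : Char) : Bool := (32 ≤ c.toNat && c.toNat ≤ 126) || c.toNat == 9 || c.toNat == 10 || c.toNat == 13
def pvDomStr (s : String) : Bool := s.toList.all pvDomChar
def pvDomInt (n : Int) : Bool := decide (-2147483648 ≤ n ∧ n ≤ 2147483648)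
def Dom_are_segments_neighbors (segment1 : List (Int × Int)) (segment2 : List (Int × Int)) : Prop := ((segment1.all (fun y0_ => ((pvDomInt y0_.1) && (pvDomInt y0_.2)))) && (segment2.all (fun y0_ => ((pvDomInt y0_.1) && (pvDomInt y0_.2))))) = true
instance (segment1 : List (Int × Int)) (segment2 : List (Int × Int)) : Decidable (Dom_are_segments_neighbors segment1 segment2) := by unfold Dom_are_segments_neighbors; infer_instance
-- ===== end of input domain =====

-- B drops A's set construction and neighbor-offset probing in favour of a direct
-- pairwise Manhattan-distance-1 scan; objective: simpler, same Boolean for all inputs.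

-- ===== PORT A =====
-- A builds set(segment1), set(segment2), then for each point of segment1_set probes
-- the four offset neighbors for membership in segment2_set; early return True = any.
def are_segments_neighbors (segment1 : List (Int × Int)) (segment2 : List (Int × Int)) : Bool :=
  let segment1_set : PySem.Set (Int × Int) := PySem.Set.ofList segment1
  let segment2_set : PySem.Set (Int × Int) := PySem.Set.ofList segment2
  segment1_set.any (fun p =>
    ([((0 : Int), (1 : Int)), (1, 0), (0, -1), (-1, 0)]).any (fun d =>
      PySem.Set.contains segment2_set (p.1 + d.1, p.2 + d.2)))

-- ===== PORT B =====
-- B: for each (x1,y1) in segment1 and (x2,y2) in segment2, return True as soon as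
-- abs(x1-x2)+abs(y1-y2) == 1; early return True = any.
def are_segments_neighbors_alt (segment1 : List (Int × Int)) (segment2 : List (Int × Int)) : Bool :=
  segment1.any (fun p =>
    segment2.any (fun q => decide (|p.1 - q.1| + |p.2 - q.2| = 1)))

-- ===== PRECONDITION & SPEC =====
def Spec_are_segments_neighbors (segment1 : List (Int × Int)) (segment2 : List (Int × Int)) (out : Bool) : Prop := out = are_segments_neighbors_alt segment1 segment2
instance (segment1 : List (Int × Int)) (segment2 : List (Int × Int)) (out : Bool) : Decidable (Spec_are_segments_neighbors segment1 segment2 out) := by unfold Spec_are_segments_neighbors; infer_instance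

-- ===== CLAIM (what is proved, stated in full; the proofs are below) =====
def Claim_equal_are_segments_neighbors : Prop := ∀ (segment1 : List (Int × Int)) (segment2 : List (Int × Int)), Dom_are_segments_neighbors segment1 segment2 → Spec_are_segments_neighbors segment1 segment2 (are_segments_neighbors segment1 segment2)

-- ===== LEMMAS AND PROOFS =====

-- |dx| + |dy| = 1 exactly for the four offsets A probes.
theorem manhattan_one_cases (dx dy : Int) :
    |dx| + |dy| = 1 ↔ (dx = 0 ∧ dy = 1) ∨ (dx = 1 ∧ dy = 0) ∨ (dx = 0 ∧ dy = -1) ∨ (dx = -1 ∧ dy = 0) := by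
  constructor
  · intro h
    rcases abs_cases dx with ⟨h1, _⟩ | ⟨h1, _⟩ <;> rcases abs_cases dy with ⟨h2, _⟩ | ⟨h2, _⟩ <;> omega
  · rintro (⟨h1, h2⟩ | ⟨h1, h2⟩ | ⟨h1, h2⟩ | ⟨h1, h2⟩) <;> subst h1 <;> subst h2 <;> decide

theorem both_exists (segment1 segment2 : List (Int × Int)) :
    are_segments_neighbors segment1 segment2 = are_segments_neighbors_alt segment1 segment2 := by
  rw [Bool.eq_iff_iff]
  simp only [are_segments_neighbors, are_segments_neighbors_alt, List.any_eq_true,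
    PySem.Set.mem_ofList, PySem.Set.contains, List.contains_eq_mem, decide_eq_true_eq,
    List.mem_cons, List.not_mem_nil, or_false]
  constructor
  · rintro ⟨⟨px, py⟩, hp, d, hd, hm⟩
    refine ⟨(px, py), hp, (px + d.1, py + d.2), hm, ?_⟩
    rcases hd with h | h | h | h <;> subst h <;> simp
  · rintro ⟨⟨px, py⟩, hp, ⟨qx, qy⟩, hq, habs⟩
    simp only at habs
    rw [manhattan_one_cases] at habs
    refine ⟨(px, py), hp, ?_⟩
    rcases habs with ⟨h1, h2⟩ | ⟨h1, h2⟩ | ⟨h1, h2⟩ | ⟨h1, h2⟩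
    · exact ⟨(0, -1), by simp, by simp only; rw [show px + 0 = qx by omega, show py + -1 = qy by omega]; exact hq⟩
    · exact ⟨(-1, 0), by simp, by simp only; rw [show px + -1 = qx by omega, show py + 0 = qy by omega]; exact hq⟩
    · exact ⟨(0, 1), by simp, by simp only; rw [show px + 0 = qx by omega, show py + 1 = qy by omega]; exact hq⟩
    · exact ⟨(1, 0), by simp, by simp only; rw [show px + 1 = qx by omega, show py + 0 = qy by omega]; exact hq⟩

-- ===== VERDICT (by name: the statement is the Claim_ definition above) =====
theorem are_segments_neighbors_spec : Claim_equal_are_segments_neighbors := by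
  intro segment1 segment2 _
  unfold Spec_are_segments_neighbors
  exact both_exists segment1 segment2
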